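-- pv_equiv track=rewrite | github.com/LorenzoVianello95/Natural-Language-Processing-2 | data_processing.py | divide_dev
-- ===== SOURCE A (Python) =====
-- def divide_dev(list_to_divide, domains):
--     s2=[]
--     s3=[]
--     s7=[]
--     s13=[]
--     s15=[]
--
--     for index in range(len(domains)):
--         if domains[index] == "senseval2":
--             s2.append(list_to_divide[index])
--         if domains[index] == "senseval3":
--             s3.append(list_to_divide[index])
--         if domains[index] == "semeval2007":
--             s7.append(list_to_divide[index])
--         if domains[index] == "semeval2013":
--             s13.append(list_to_divide[index])
--         if domains[index] == "semeval2015":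
--             s15.append(list_to_divide[index])
--
--     return s2,s3,s7,s13,s15
-- ===== SOURCE B (Python) =====
-- def divide_dev(list_to_divide, domains):
--     pairs = list(zip(domains, list_to_divide))
--     s2 = [x for d, x in pairs if d == "senseval2"]
--     s3 = [x for d, x in pairs if d == "senseval3"]
--     s7 = [x for d, x in pairs if d == "semeval2007"]
--     s13 = [x for d, x in pairs if d == "semeval2013"]
--     s15 = [x for d, x in pairs if d == "semeval2015"]
--     return s2, s3, s7, s13, s15
-- ===== Notes on version B (the rewrite author's own statement) =====
-- stated objective: idiomatic
-- what changed: Replaces the single indexed loop with five equality branches by one zip pairing followed by five filtered comprehensions, eliminating all index arithmetic.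
import Mathlib
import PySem

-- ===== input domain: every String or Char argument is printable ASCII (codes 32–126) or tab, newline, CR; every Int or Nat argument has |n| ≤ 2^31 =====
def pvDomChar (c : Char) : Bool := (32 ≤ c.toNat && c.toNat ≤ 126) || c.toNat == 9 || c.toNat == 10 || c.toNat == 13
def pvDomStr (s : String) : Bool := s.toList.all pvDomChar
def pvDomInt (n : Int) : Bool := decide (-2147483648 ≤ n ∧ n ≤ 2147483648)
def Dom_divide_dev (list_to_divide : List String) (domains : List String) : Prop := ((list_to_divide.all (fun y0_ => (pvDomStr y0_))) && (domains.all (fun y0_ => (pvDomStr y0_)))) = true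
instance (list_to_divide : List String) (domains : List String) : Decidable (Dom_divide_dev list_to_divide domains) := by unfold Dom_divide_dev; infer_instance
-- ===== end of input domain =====

-- B replaces A's indexed loop with five equality branches by one zip pairing and five filtered comprehensions (idiomatic; return value only).


-- ===== PORT A =====
-- for index in range(len(domains)): five independent 'if domains[index] == …: append(list_to_divide[index])' branches.
-- list_to_divide[index] is read only inside a matching branch; Pre_ below keeps those reads in range (pyGetD's default is never used there).
def divide_dev (list_to_divide : List String) (domains : List String) : List String × List String × List String × List String × List String :=
  (PySem.List.pyRange 0 (PySem.List.len domains) 1).foldl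
    (fun acc index =>
      let (s2, s3, s7, s13, s15) := acc
      let d := PySem.List.pyGetD domains index ""
      let s2 := if d = "senseval2" then s2 ++ [PySem.List.pyGetD list_to_divide index ""] else s2
      let s3 := if d = "senseval3" then s3 ++ [PySem.List.pyGetD list_to_divide index ""] else s3
      let s7 := if d = "semeval2007" then s7 ++ [PySem.List.pyGetD list_to_divide index ""] else s7
      let s13 := if d = "semeval2013" then s13 ++ [PySem.List.pyGetD list_to_divide index ""] else s13
      let s15 := if d = "semeval2015" then s15 ++ [PySem.List.pyGetD list_to_divide index ""] else s15
      (s2, s3, s7, s13, s15))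
    ([], [], [], [], [])

-- ===== PORT B =====
def divide_dev_alt (list_to_divide : List String) (domains : List String) : List String × List String × List String × List String × List String :=
  let pairs := domains.zip list_to_divide
  ((pairs.filter (fun p => p.1 = "senseval2")).map Prod.snd,
   (pairs.filter (fun p => p.1 = "senseval3")).map Prod.snd,
   (pairs.filter (fun p => p.1 = "semeval2007")).map Prod.snd,
   (pairs.filter (fun p => p.1 = "semeval2013")).map Prod.snd,
   (pairs.filter (fun p => p.1 = "semeval2015")).map Prod.snd)

-- ===== PRECONDITION & SPEC =====
def pvLabels : List String := ["senseval2", "senseval3", "semeval2007", "semeval2013", "semeval2015"]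

-- Pre_ excludes exactly the inputs where A raises IndexError: a recognised label at an index ≥ len(list_to_divide).
def Pre_divide_dev (list_to_divide : List String) (domains : List String) : Prop :=
  ∀ p ∈ domains.zipIdx, p.1 ∈ pvLabels → p.2 < list_to_divide.length
instance (list_to_divide : List String) (domains : List String) : Decidable (Pre_divide_dev list_to_divide domains) := by unfold Pre_divide_dev; infer_instance
def pvWitness_divide_dev : List String × List String := (["x", "y"], ["senseval2", "foo"])

def Spec_divide_dev (list_to_divide : List String) (domains : List String) (out : List String × List String × List String × List String × List String) : Prop := out = divide_dev_alt list_to_divide domains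
instance (list_to_divide : List String) (domains : List String) (out : List String × List String × List String × List String × List String) : Decidable (Spec_divide_dev list_to_divide domains out) := by unfold Spec_divide_dev; infer_instance

-- ===== CLAIM (what is proved, stated in full; the proofs are below) =====
def Claim_equal_divide_dev : Prop := ∀ (list_to_divide : List String) (domains : List String), Dom_divide_dev list_to_divide domains → Pre_divide_dev list_to_divide domains → Spec_divide_dev list_to_divide domains (divide_dev list_to_divide domains)

-- ===== LEMMAS AND PROOFS =====

-- One label's comprehension: [x for (d, x) in zip(domains, lst) if d == lab].
def pvSel (lab : String) (domains list_to_divide : List String) : List String :=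
  ((domains.zip list_to_divide).filter (fun p => p.1 = lab)).map Prod.snd

-- A's loop body as a function of the two lists.
def pvStep (domains list_to_divide : List String)
    (acc : List String × List String × List String × List String × List String) (index : Int) :
    List String × List String × List String × List String × List String :=
  let (s2, s3, s7, s13, s15) := acc
  let d := PySem.List.pyGetD domains index ""
  let s2 := if d = "senseval2" then s2 ++ [PySem.List.pyGetD list_to_divide index ""] else s2
  let s3 := if d = "senseval3" then s3 ++ [PySem.List.pyGetD list_to_divide index ""] else s3
  let s7 := if d = "semeval2007" then s7 ++ [PySem.List.pyGetD list_to_divide index ""] else s7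
  let s13 := if d = "semeval2013" then s13 ++ [PySem.List.pyGetD list_to_divide index ""] else s13
  let s15 := if d = "semeval2015" then s15 ++ [PySem.List.pyGetD list_to_divide index ""] else s15
  (s2, s3, s7, s13, s15)

theorem pvShift (d : String) (ds lst : List String) (m : Nat) (acc : List String × List String × List String × List String × List String) :
    (PySem.List.pyRange 1 ((m : Int) + 1) 1).foldl (pvStep (d :: ds) lst) acc
      = (PySem.List.pyRange 0 (m : Int) 1).foldl (pvStep ds lst.tail) acc := by
  rw [PySem.List.pyRange_one, PySem.List.pyRange_one]
  simp only [add_sub_cancel_right, sub_zero, Int.toNat_natCast, List.foldl_map]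
  congr 1
  funext a k
  obtain ⟨a2, a3, a7, a13, a15⟩ := a
  have h1 : (1 : Int) + (k : Int) = ((k + 1 : Nat) : Int) := by omega
  have h0 : (0 : Int) + (k : Int) = ((k : Nat) : Int) := by omega
  cases lst with
  | nil =>
      simp only [pvStep, h1, h0, PySem.List.pyGetD_natCast, List.getD_cons_succ, List.tail_nil, List.getD_nil]
  | cons x xs =>
      simp only [pvStep, h1, h0, PySem.List.pyGetD_natCast, List.getD_cons_succ, List.tail_cons]

theorem pvMain (ds lst : List String) (a2 a3 a7 a13 a15 : List String)
    (hpre : ∀ j : Nat, (h : j < ds.length) → ds[j] ∈ pvLabels → j < lst.length) :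
    (PySem.List.pyRange 0 ((ds.length : Int)) 1).foldl (pvStep ds lst) (a2, a3, a7, a13, a15)
      = (a2 ++ pvSel "senseval2" ds lst, a3 ++ pvSel "senseval3" ds lst,
         a7 ++ pvSel "semeval2007" ds lst, a13 ++ pvSel "semeval2013" ds lst,
         a15 ++ pvSel "semeval2015" ds lst) := by
  induction ds generalizing lst a2 a3 a7 a13 a15 with
  | nil => simp [pvSel]
  | cons d ds ih =>
    rw [show (((d :: ds).length : Nat) : Int) = (ds.length : Int) + 1 from by
          push_cast [List.length_cons]; ring]
    rw [PySem.List.pyRange_one_cons (by omega : (0 : Int) < (ds.length : Int) + 1)]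
    rw [List.foldl_cons, show (0 : Int) + 1 = 1 from by ring, pvShift]
    cases lst with
    | nil =>
      have hd : d ∉ pvLabels := by
        intro hmem
        simpa using hpre 0 (by simp) (by simpa using hmem)
      have hstep : pvStep (d :: ds) [] (a2, a3, a7, a13, a15) 0 = (a2, a3, a7, a13, a15) := by
        have h2 : d ≠ "senseval2" := fun h => hd (by simp [pvLabels, h])
        have h3 : d ≠ "senseval3" := fun h => hd (by simp [pvLabels, h])
        have h7 : d ≠ "semeval2007" := fun h => hd (by simp [pvLabels, h])
        have h13 : d ≠ "semeval2013" := fun h => hd (by simp [pvLabels, h])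
        have h15 : d ≠ "semeval2015" := fun h => hd (by simp [pvLabels, h])
        simp [pvStep, PySem.List.pyGetD_zero_cons, h2, h3, h7, h13, h15]
      rw [hstep, List.tail_nil, ih]
      · simp [pvSel]
      · intro j hj hmem
        have h := hpre (j + 1) (by simpa using Nat.succ_lt_succ hj) (by simpa using hmem)
        simp only [List.length_nil] at h
        omega
    | cons x xs =>
      have hstep : pvStep (d :: ds) (x :: xs) (a2, a3, a7, a13, a15) 0 =
          (if d = "senseval2" then a2 ++ [x] else a2,
           if d = "senseval3" then a3 ++ [x] else a3,
           if d = "semeval2007" then a7 ++ [x] else a7,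
           if d = "semeval2013" then a13 ++ [x] else a13,
           if d = "semeval2015" then a15 ++ [x] else a15) := by
        simp [pvStep, PySem.List.pyGetD_zero_cons]
      rw [hstep, List.tail_cons, ih]
      · simp only [pvSel, List.zip_cons_cons, List.filter_cons, decide_eq_true_eq]
        split_ifs <;> simp_all
      · intro j hj hmem
        have h := hpre (j + 1) (by simpa using Nat.succ_lt_succ hj) (by simpa using hmem)
        simp only [List.length_cons] at h
        omega

-- ===== VERDICT (by name: the statement is the Claim_ definition above) =====
theorem divide_dev_spec : Claim_equal_divide_dev := by
  intro lst doms _ hpre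
  show _ = _
  have hpre' : ∀ j : Nat, (h : j < doms.length) → doms[j] ∈ pvLabels → j < lst.length := by
    intro j hj hmem
    exact hpre (doms[j], j) (by rw [List.mem_zipIdx_iff_getElem?]; simp [hj]) hmem
  have h := pvMain doms lst [] [] [] [] [] hpre'
  simpa [divide_dev, divide_dev_alt, pvStep, pvSel, PySem.List.len_eq] using h
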